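-- pv_equiv track=rewrite | github.com/wen-placeholder/foundations-of-distributed-systems-2025 | fds-fs25-ex1/template/task1/main.py | _dfs
-- ===== SOURCE A (Python) =====
-- from typing import Dict, List, Tuple, Iterable, Set
--
-- def _dfs(start: str, target: str, adj: Dict[str, List[str]]) -> bool:
--     # Helper: DFS to test reachability from start to target.
--     stack = [start]
--     seen = {start}
--     while stack:
--         x = stack.pop()
--         if x == target:
--             return True
--         for y in adj.get(x, []):
--             if y not in seen:
--                 seen.add(y)
--                 stack.append(y)
--     return False
-- ===== SOURCE B (Python) =====
-- def _dfs(start: str, target: str, adj: dict) -> bool: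
--     # Fixed-point saturation: repeatedly add all neighbors of the current
--     # reachable set; after enough rounds the set is closed, then test target.
--     reach = {start}
--     for _ in range(1 + sum(len(vs) for vs in adj.values())):
--         reach = reach | {y for x in reach for y in adj.get(x, [])}
--     return target in reach
-- ===== Notes on version B (the rewrite author's own statement) =====
-- stated objective: alternative
-- what changed: Replaces A's explicit-stack DFS with early exit by a stackless fixed-point saturation: repeatedly union in all neighbors of the current reachable set for a sufficient number of rounds, then test target membership.
import Mathlib
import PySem

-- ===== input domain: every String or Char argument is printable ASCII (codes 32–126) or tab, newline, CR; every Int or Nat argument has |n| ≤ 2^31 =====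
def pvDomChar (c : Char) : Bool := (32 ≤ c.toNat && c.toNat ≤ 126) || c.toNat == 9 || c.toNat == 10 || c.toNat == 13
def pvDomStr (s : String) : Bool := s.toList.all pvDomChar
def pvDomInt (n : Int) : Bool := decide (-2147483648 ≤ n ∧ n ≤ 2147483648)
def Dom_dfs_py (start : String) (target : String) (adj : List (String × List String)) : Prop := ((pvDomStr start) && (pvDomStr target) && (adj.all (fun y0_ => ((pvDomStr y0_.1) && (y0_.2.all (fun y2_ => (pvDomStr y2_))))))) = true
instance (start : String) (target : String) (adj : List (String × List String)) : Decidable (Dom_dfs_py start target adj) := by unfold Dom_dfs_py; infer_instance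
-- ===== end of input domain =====

-- B replaces A's explicit-stack DFS with a loop-free-of-stack fixed-point saturation
-- (repeatedly add all neighbours of the current reachable set, then test membership);
-- objective: alternative decomposition, same exact return value.

-- ===== PORT A =====
-- stack kept with its TOP AT THE HEAD: Python's append/pop() at the right end is
-- prepend/pop-at-head here; 'fuel' only makes the while-loop structural (proved never exhausted).
def dfsAAux (adj : List (String × List String)) (target : String) :
    Nat → List String → PySem.Set String → Bool
  | _, [], _ => false
  | 0, _ :: _, _ => false
  | n+1, x :: rest, seen =>
    if x == target then true
    else
      let q := (PySem.Dict.getD (PySem.Dict.mk adj) x []).foldl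
        (fun (p : List String × PySem.Set String) y =>
          if PySem.Set.contains p.2 y then p else (y :: p.1, PySem.Set.add p.2 y))
        (rest, seen)
      dfsAAux adj target n q.1 q.2

def dfs_py (start : String) (target : String) (adj : List (String × List String)) : Bool :=
  dfsAAux adj target (1 + (adj.map (fun p => p.2.length)).sum) [start]
    (PySem.Set.ofList [start])

-- ===== PORT B =====
def dfs_py_alt (start : String) (target : String) (adj : List (String × List String)) : Bool :=
  PySem.Set.contains
    ((List.range (1 + ((PySem.Dict.values (PySem.Dict.mk adj)).map List.length).sum)).foldl
      (fun r _ =>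
        PySem.Set.union r
          (r.foldl (fun fr x => PySem.Set.update fr (PySem.Dict.getD (PySem.Dict.mk adj) x []))
            PySem.Set.empty))
      (PySem.Set.ofList [start]))
    target

-- ===== PRECONDITION & SPEC =====
def Spec_dfs_py (start : String) (target : String) (adj : List (String × List String)) (out : Bool) : Prop := out = dfs_py_alt start target adj
instance (start : String) (target : String) (adj : List (String × List String)) (out : Bool) : Decidable (Spec_dfs_py start target adj out) := by unfold Spec_dfs_py; infer_instance

-- ===== CLAIM (what is proved, stated in full; the proofs are below) =====
def Claim_equal_dfs_py : Prop := ∀ (start : String) (target : String) (adj : List (String × List String)), Dom_dfs_py start target adj → Spec_dfs_py start target adj (dfs_py start target adj)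

-- ===== LEMMAS AND PROOFS =====

-- neighbours of x (Python adj.get(x, []))
def Nb (adj : List (String × List String)) (x : String) : List String :=
  PySem.Dict.getD (PySem.Dict.mk adj) x []

-- reachability in the graph
def Reach (adj : List (String × List String)) (s t : String) : Prop :=
  Relation.ReflTransGen (fun a b => b ∈ Nb adj a) s t

-- universe of all nodes that can ever be seen
def Univ (adj : List (String × List String)) (start : String) : List String :=
  PySem.Set.ofList (start :: adj.flatMap (fun p => p.2))

lemma nb_subset {adj : List (String × List String)} {x y : String}
    (h : y ∈ Nb adj x) : y ∈ adj.flatMap (fun p => p.2) := by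
  induction adj with
  | nil => simp [Nb, PySem.Dict.getD, PySem.Dict.get?] at h
  | cons p rest ih =>
    obtain ⟨k, v⟩ := p
    simp only [Nb, PySem.Dict.getD, PySem.Dict.get?_mk_cons] at h ih
    by_cases hk : k == x
    · rw [if_pos hk] at h
      simp only [Option.getD_some] at h
      exact List.mem_flatMap.mpr ⟨(k, v), List.mem_cons_self .., h⟩
    · rw [if_neg hk] at h
      simp only [List.flatMap_cons, List.mem_append]
      exact Or.inr (ih h)

lemma nb_mem_univ {adj : List (String × List String)} {start x y : String}
    (h : y ∈ Nb adj x) : y ∈ Univ adj start := by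
  unfold Univ
  rw [PySem.Set.mem_ofList]
  exact List.mem_cons_of_mem _ (nb_subset h)

lemma start_mem_univ (adj : List (String × List String)) (start : String) :
    start ∈ Univ adj start := by
  unfold Univ; rw [PySem.Set.mem_ofList]; exact List.mem_cons_self ..

lemma univ_len_le (adj : List (String × List String)) (start : String) :
    (Univ adj start).length ≤ 1 + (adj.map (fun p => p.2.length)).sum := by
  have h1 := PySem.Set.length_ofList_le (start :: adj.flatMap (fun p => p.2))
  simp only [List.length_cons, List.length_flatMap] at h1
  unfold Univ
  omega

-- a set containing start and closed under neighbours contains everything reachable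
lemma reach_mem {adj : List (String × List String)} {start target : String}
    {S : List String} (hs : start ∈ S)
    (hc : ∀ x ∈ S, ∀ y ∈ Nb adj x, y ∈ S)
    (h : Reach adj start target) : target ∈ S := by
  induction h with
  | refl => exact hs
  | tail _ hstep ih => exact hc _ ih _ hstep

-- ---- the inner for-loop of A ----

lemma afold (L : List String) : ∀ (rest : List String) (seen : PySem.Set String),
    (∀ z, z ∈ (L.foldl
        (fun (p : List String × PySem.Set String) y =>
          if PySem.Set.contains p.2 y then p else (y :: p.1, PySem.Set.add p.2 y))
        (rest, seen)).2 ↔ z ∈ seen ∨ z ∈ L) ∧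
    (∀ z, z ∈ (L.foldl
        (fun (p : List String × PySem.Set String) y =>
          if PySem.Set.contains p.2 y then p else (y :: p.1, PySem.Set.add p.2 y))
        (rest, seen)).1 ↔ z ∈ rest ∨ (z ∈ L ∧ z ∉ seen)) ∧
    (seen.Nodup → (L.foldl
        (fun (p : List String × PySem.Set String) y =>
          if PySem.Set.contains p.2 y then p else (y :: p.1, PySem.Set.add p.2 y))
        (rest, seen)).2.Nodup) ∧
    ((L.foldl
        (fun (p : List String × PySem.Set String) y =>
          if PySem.Set.contains p.2 y then p else (y :: p.1, PySem.Set.add p.2 y))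
        (rest, seen)).1.length + seen.length
      = rest.length + (L.foldl
        (fun (p : List String × PySem.Set String) y =>
          if PySem.Set.contains p.2 y then p else (y :: p.1, PySem.Set.add p.2 y))
        (rest, seen)).2.length) := by
  induction L with
  | nil => intro rest seen; simp
  | cons y L' ih =>
    intro rest seen
    by_cases hy : y ∈ seen
    · have hcy : PySem.Set.contains seen y = true := List.contains_iff_mem.mpr hy
      simp only [List.foldl_cons, hcy, if_pos]
      obtain ⟨i1, i2, i3, i4⟩ := ih rest seen
      refine ⟨?_, ?_, i3, i4⟩
      · intro z; rw [i1 z, List.mem_cons]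
        by_cases hz : z = y
        · subst hz; simp [hy]
        · tauto
      · intro z; rw [i2 z, List.mem_cons]
        by_cases hz : z = y
        · subst hz; simp [hy]
        · tauto
    · have hcy : PySem.Set.contains seen y = false := by
        rw [← Bool.not_eq_true]; intro hc; exact hy (List.contains_iff_mem.mp hc)
      simp only [List.foldl_cons, hcy, Bool.false_eq_true, if_neg, not_false_iff]
      obtain ⟨i1, i2, i3, i4⟩ := ih (y :: rest) (PySem.Set.add seen y)
      refine ⟨?_, ?_, ?_, ?_⟩
      · intro z; rw [i1 z, PySem.Set.mem_add, List.mem_cons]; tauto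
      · intro z
        rw [i2 z]
        simp only [PySem.Set.mem_add, List.mem_cons]
        by_cases hz : z = y
        · subst hz; simp [hy]
        · constructor
          · rintro (⟨rfl | h⟩ | ⟨h1, h2⟩)
            · exact absurd rfl hz
            · exact Or.inl h
            · exact Or.inr ⟨Or.inr h1, fun hm => h2 (Or.inl hm)⟩
          · rintro (h | ⟨rfl | h1, h2⟩)
            · exact Or.inl (Or.inr h)
            · exact absurd rfl hz
            · exact Or.inr ⟨h1, fun hm => hm.elim h2 hz⟩
      · intro hnd; exact i3 (PySem.Set.nodup_add _ _ hnd)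
      · have hlen : (PySem.Set.add seen y).length = seen.length + 1 := by
          rw [PySem.Set.add_of_not_mem hy, List.length_append, List.length_cons,
            List.length_nil]
        rw [hlen] at i4; simp only [List.length_cons] at i4 ⊢; omega

-- ---- A: soundness ----

lemma dfsA_sound {adj : List (String × List String)} {start target : String} :
    ∀ (fuel : Nat) (stack : List String) (seen : PySem.Set String),
    (∀ x ∈ stack, Reach adj start x) →
    dfsAAux adj target fuel stack seen = true → Reach adj start target := by
  intro fuel
  induction fuel with
  | zero =>
    intro stack seen hst hres
    cases stack with
    | nil => simp [dfsAAux] at hres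
    | cons x rest => simp [dfsAAux] at hres
  | succ n ih =>
    intro stack seen hst hres
    cases stack with
    | nil => simp [dfsAAux] at hres
    | cons x rest =>
      by_cases hx : x == target
      · have : x = target := by simpa using hx
        exact this ▸ hst x (List.mem_cons_self ..)
      · rw [dfsAAux, if_neg (by simpa using hx)] at hres
        obtain ⟨_, i2, _, _⟩ := afold (PySem.Dict.getD (PySem.Dict.mk adj) x []) rest seen
        refine ih _ _ ?_ hres
        intro z hz
        rcases (i2 z).mp hz with h | ⟨h1, _⟩
        · exact hst z (List.mem_cons_of_mem _ h)
        · exact Relation.ReflTransGen.tail (hst x (List.mem_cons_self ..)) h1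

-- ---- A: if it returns false there is a closed, target-free superset of seen ----

lemma dfsA_false {adj : List (String × List String)} {start target : String} :
    ∀ (fuel : Nat) (stack : List String) (seen : PySem.Set String),
    (∀ x ∈ stack, x ∈ seen) →
    (∀ x ∈ seen, x ∉ stack → x ≠ target ∧ ∀ y ∈ Nb adj x, y ∈ seen) →
    seen.Nodup →
    (∀ x ∈ seen, x ∈ Univ adj start) →
    stack.length + (Univ adj start).length ≤ fuel + seen.length →
    dfsAAux adj target fuel stack seen = false →
    ∃ S : List String, (∀ x ∈ seen, x ∈ S) ∧
      ∀ x ∈ S, x ≠ target ∧ ∀ y ∈ Nb adj x, y ∈ S := by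
  intro fuel
  induction fuel with
  | zero =>
    intro stack seen hss hcl hnd hU hfuel _
    cases stack with
    | nil =>
      exact ⟨seen, fun x hx => hx, fun x hx => hcl x hx (List.not_mem_nil)⟩
    | cons x rest =>
      exfalso
      have hle : seen.length ≤ (Univ adj start).length :=
        ((List.Nodup.subperm hnd hU).length_le)
      simp only [List.length_cons] at hfuel; omega
  | succ n ih =>
    intro stack seen hss hcl hnd hU hfuel hres
    cases stack with
    | nil =>
      exact ⟨seen, fun x hx => hx, fun x hx => hcl x hx (List.not_mem_nil)⟩
    | cons x rest =>
      by_cases hx : x == target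
      · rw [dfsAAux, if_pos hx] at hres; exact absurd hres (by simp)
      · have hxt : x ≠ target := by simpa using hx
        rw [dfsAAux, if_neg (by simpa using hx)] at hres
        obtain ⟨i1, i2, i3, i4⟩ := afold (PySem.Dict.getD (PySem.Dict.mk adj) x []) rest seen
        have hLNb : PySem.Dict.getD (PySem.Dict.mk adj) x [] = Nb adj x := rfl
        refine (ih _ _ ?_ ?_ (i3 hnd) ?_ ?_ hres).imp ?_
        · -- stack ⊆ seen
          intro z hz
          rcases (i2 z).mp hz with h | ⟨h1, _⟩
          · exact (i1 z).mpr (Or.inl (hss z (List.mem_cons_of_mem _ h)))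
          · exact (i1 z).mpr (Or.inr h1)
        · -- closure off the stack
          intro z hz hznot
          have hz' := (i1 z).mp hz
          have hzr : z ∉ rest := fun hm => hznot ((i2 z).mpr (Or.inl hm))
          have hzs : z ∈ seen := by
            rcases hz' with h | h
            · exact h
            · by_cases hm : z ∈ seen
              · exact hm
              · exact absurd ((i2 z).mpr (Or.inr ⟨h, hm⟩)) hznot
          by_cases hzx : z = x
          · subst hzx
            exact ⟨hxt, fun y hy => (i1 y).mpr (Or.inr (hLNb ▸ hy))⟩
          · have := hcl z hzs (by
              intro hm; rcases List.mem_cons.mp hm with h | h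
              · exact hzx h
              · exact hzr h)
            exact ⟨this.1, fun y hy => (i1 y).mpr (Or.inl (this.2 y hy))⟩
        · -- seen ⊆ Univ
          intro z hz
          rcases (i1 z).mp hz with h | h
          · exact hU z h
          · exact nb_mem_univ (hLNb ▸ h)
        · -- fuel
          simp only [List.length_cons] at hfuel; omega
        · -- superset transfer
          intro S hS
          exact ⟨fun z hz => hS.1 z ((i1 z).mpr (Or.inl hz)), hS.2⟩

lemma ofList_singleton (s : String) : PySem.Set.ofList [s] = [s] := rfl

lemma dfsA_iff (start target : String) (adj : List (String × List String)) :
    dfs_py start target adj = true ↔ Reach adj start target := by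
  constructor
  · intro h
    refine dfsA_sound _ _ _ ?_ h
    intro x hx
    rw [List.mem_singleton.mp hx]
    exact Relation.ReflTransGen.refl
  · intro hreach
    by_contra hfalse
    have hres : dfs_py start target adj = false := by
      cases h : dfs_py start target adj
      · rfl
      · exact absurd h hfalse
    unfold dfs_py at hres
    rw [ofList_singleton] at hres
    obtain ⟨S, hsub, hclosed⟩ := dfsA_false _ _ _
      (by intro x hx; simpa using hx)
      (by
        intro x hx hnot
        exact absurd hx hnot)
      (List.nodup_singleton _)
      (by intro x hx; rw [List.mem_singleton.mp hx]
          exact start_mem_univ adj start)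
      (by
        have := univ_len_le adj start
        simp only [List.length_cons, List.length_nil]; omega)
      hres
    have hstart : start ∈ S := hsub start (List.mem_singleton.mpr rfl)
    have htarget := reach_mem hstart (fun x hx => (hclosed x hx).2) hreach
    exact (hclosed target htarget).1 rfl

-- ---- B ----

def BStep (adj : List (String × List String)) (r : PySem.Set String) : PySem.Set String :=
  PySem.Set.union r
    (r.foldl (fun fr x => PySem.Set.update fr (PySem.Dict.getD (PySem.Dict.mk adj) x []))
      PySem.Set.empty)

lemma mem_frontier (adj : List (String × List String)) (r : List String) :
    ∀ (init : PySem.Set String) (z : String),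
    (z ∈ r.foldl (fun fr x => PySem.Set.update fr (PySem.Dict.getD (PySem.Dict.mk adj) x [])) init
      ↔ z ∈ init ∨ ∃ x ∈ r, z ∈ Nb adj x) := by
  induction r with
  | nil => intro init z; simp
  | cons a r' ih =>
    intro init z
    rw [List.foldl_cons, ih, PySem.Set.mem_update]
    constructor
    · rintro ((h | h) | ⟨x, hx, hz⟩)
      · exact Or.inl h
      · exact Or.inr ⟨a, List.mem_cons_self .., h⟩
      · exact Or.inr ⟨x, List.mem_cons_of_mem _ hx, hz⟩
    · rintro (h | ⟨x, hx, hz⟩)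
      · exact Or.inl (Or.inl h)
      · rcases List.mem_cons.mp hx with rfl | hx'
        · exact Or.inl (Or.inr hz)
        · exact Or.inr ⟨x, hx', hz⟩

lemma mem_bstep {adj : List (String × List String)} {r : PySem.Set String} {z : String} :
    z ∈ BStep adj r ↔ z ∈ r ∨ ∃ x ∈ r, z ∈ Nb adj x := by
  unfold BStep
  rw [PySem.Set.mem_union, mem_frontier]
  simp [PySem.Set.empty]

lemma bstep_prefix (adj : List (String × List String)) (r : PySem.Set String) :
    ∃ ext : List String, BStep adj r = r ++ ext := by
  unfold BStep
  exact ⟨_, PySem.Set.update_eq_append_filter _ _⟩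

lemma bstep_nodup {adj : List (String × List String)} {r : PySem.Set String}
    (h : r.Nodup) : (BStep adj r).Nodup :=
  PySem.Set.nodup_union _ _ h

-- iterate of BStep
lemma foldl_range_iterate {α : Type} (f : α → α) (a : α) :
    ∀ n : Nat, (List.range n).foldl (fun r _ => f r) a = f^[n] a := by
  intro n
  induction n with
  | zero => rfl
  | succ m ih =>
    rw [List.range_succ, List.foldl_append, ih, List.foldl_cons, List.foldl_nil,
      Function.iterate_succ_apply']

lemma bIter_sub_univ (adj : List (String × List String)) (start : String) :
    ∀ n, ∀ z ∈ (BStep adj)^[n] (PySem.Set.ofList [start]), z ∈ Univ adj start := by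
  intro n
  induction n with
  | zero =>
    intro z hz
    rw [ofList_singleton] at hz
    rw [List.mem_singleton.mp hz]
    exact start_mem_univ adj start
  | succ m ih =>
    intro z hz
    rw [Function.iterate_succ_apply'] at hz
    rcases mem_bstep.mp hz with h | ⟨x, hx, hnb⟩
    · exact ih z h
    · exact nb_mem_univ hnb

lemma bIter_nodup (adj : List (String × List String)) (start : String) :
    ∀ n, ((BStep adj)^[n] (PySem.Set.ofList [start])).Nodup := by
  intro n
  induction n with
  | zero => rw [ofList_singleton]; exact List.nodup_singleton _
  | succ m ih => rw [Function.iterate_succ_apply']; exact bstep_nodup ih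

lemma bIter_sound (adj : List (String × List String)) (start : String) :
    ∀ n, ∀ z ∈ (BStep adj)^[n] (PySem.Set.ofList [start]), Reach adj start z := by
  intro n
  induction n with
  | zero =>
    intro z hz
    rw [ofList_singleton] at hz
    rw [List.mem_singleton.mp hz]
    exact Relation.ReflTransGen.refl
  | succ m ih =>
    intro z hz
    rw [Function.iterate_succ_apply'] at hz
    rcases mem_bstep.mp hz with h | ⟨x, hx, hnb⟩
    · exact ih z h
    · exact Relation.ReflTransGen.tail (ih x hx) hnb

lemma bIter_start_mem (adj : List (String × List String)) (start : String) :
    ∀ n, start ∈ (BStep adj)^[n] (PySem.Set.ofList [start]) := by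
  intro n
  induction n with
  | zero => rw [ofList_singleton]; exact List.mem_singleton.mpr rfl
  | succ m ih =>
    rw [Function.iterate_succ_apply']
    exact mem_bstep.mpr (Or.inl ih)

lemma bIter_growth (adj : List (String × List String)) (start : String) :
    ∀ n, (∀ i < n, BStep adj ((BStep adj)^[i] (PySem.Set.ofList [start]))
            ≠ (BStep adj)^[i] (PySem.Set.ofList [start])) →
      n + 1 ≤ ((BStep adj)^[n] (PySem.Set.ofList [start])).length := by
  intro n
  induction n with
  | zero => intro _; rw [ofList_singleton]; simp
  | succ m ih =>
    intro h
    have hm := ih (fun i hi => h i (Nat.lt_succ_of_lt hi))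
    obtain ⟨ext, hext⟩ := bstep_prefix adj ((BStep adj)^[m] (PySem.Set.ofList [start]))
    have hne := h m (Nat.lt_succ_self m)
    have hextne : ext ≠ [] := by
      intro h0; rw [h0, List.append_nil] at hext; exact hne hext
    rw [Function.iterate_succ_apply', hext, List.length_append]
    have : 1 ≤ ext.length := List.length_pos_iff.mpr hextne
    omega

lemma bIter_stable (adj : List (String × List String)) (start : String) {i : Nat}
    (h : BStep adj ((BStep adj)^[i] (PySem.Set.ofList [start]))
        = (BStep adj)^[i] (PySem.Set.ofList [start])) :
    ∀ j, i ≤ j → (BStep adj)^[j] (PySem.Set.ofList [start])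
        = (BStep adj)^[i] (PySem.Set.ofList [start]) := by
  intro j
  induction j with
  | zero => intro hj; rw [Nat.le_zero.mp hj]
  | succ m ih =>
    intro hj
    by_cases hm : i ≤ m
    · rw [Function.iterate_succ_apply', ih hm, h]
    · have hieq : i = m + 1 := by omega
      rw [hieq]

lemma bIter_closed (adj : List (String × List String)) (start : String) :
    ∀ x ∈ (BStep adj)^[1 + (adj.map (fun p => p.2.length)).sum] (PySem.Set.ofList [start]),
      ∀ y ∈ Nb adj x,
        y ∈ (BStep adj)^[1 + (adj.map (fun p => p.2.length)).sum] (PySem.Set.ofList [start]) := by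
  set K := 1 + (adj.map (fun p => p.2.length)).sum with hK
  have hstab : ∃ i < K, BStep adj ((BStep adj)^[i] (PySem.Set.ofList [start]))
      = (BStep adj)^[i] (PySem.Set.ofList [start]) := by
    by_contra hno
    push Not at hno
    have hg := bIter_growth adj start K (fun i hi => hno i hi)
    have hlen : ((BStep adj)^[K] (PySem.Set.ofList [start])).length
        ≤ (Univ adj start).length :=
      (List.Nodup.subperm (bIter_nodup adj start K) (bIter_sub_univ adj start K)).length_le
    have := univ_len_le adj start
    omega
  obtain ⟨i, hiK, hstable⟩ := hstab
  have hKi := bIter_stable adj start hstable K (Nat.le_of_lt hiK)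
  intro x hx y hy
  rw [hKi] at hx ⊢
  rw [← hstable]
  exact mem_bstep.mpr (Or.inr ⟨x, hx, hy⟩)

lemma values_sum (adj : List (String × List String)) :
    ((PySem.Dict.values (PySem.Dict.mk adj)).map List.length).sum
      = (adj.map (fun p => p.2.length)).sum := by
  rw [PySem.Dict.values_mk, List.map_map]
  rfl

lemma dfsB_iff (start target : String) (adj : List (String × List String)) :
    dfs_py_alt start target adj = true ↔ Reach adj start target := by
  unfold dfs_py_alt
  rw [values_sum]
  show PySem.Set.contains
      ((List.range (1 + (adj.map (fun p => p.2.length)).sum)).foldl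
        (fun r _ => BStep adj r) (PySem.Set.ofList [start])) target = true ↔ _
  rw [foldl_range_iterate (BStep adj) (PySem.Set.ofList [start]),
    PySem.Set.contains_eq_listContains, List.contains_iff_mem]
  constructor
  · intro h
    exact bIter_sound adj start _ target h
  · intro hreach
    exact reach_mem (bIter_start_mem adj start _) (bIter_closed adj start) hreach

-- ===== VERDICT (by name: the statement is the Claim_ definition above) =====
theorem dfs_py_spec : Claim_equal_dfs_py := by
  intro start target adj _
  unfold Spec_dfs_py
  cases hA : dfs_py start target adj
  · cases hB : dfs_py_alt start target adj
    · rfl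
    · exact absurd ((dfsA_iff start target adj).mpr ((dfsB_iff start target adj).mp hB))
        (by simp [hA])
  · exact ((dfsB_iff start target adj).mpr ((dfsA_iff start target adj).mp hA)).symm
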